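-- pv_equiv track=rewrite | github.com/ivmfnal/mnvcon | webserver/Server.py | line_consolidator
-- ===== SOURCE A (Python) =====
-- def line_consolidator(it, n):
--     lines = []
--     for line in it:
--         lines.append(line)
--         if len(lines) > n:
--             yield ''.join(lines)
--             lines = []
--     if lines:
--         yield ''.join(lines)
-- ===== SOURCE B (Python) =====
-- def line_consolidator(it, n):
--     xs = list(it)
--     step = n + 1 if n >= 0 else 1
--     while xs:
--         yield ''.join(xs[:step])
--         xs = xs[step:]
-- ===== Notes on version B (the rewrite author's own statement) =====
-- stated objective: alternative
-- what changed: B computes the chunk size max(n+1,1) once up front and repeatedly slices fixed-size chunks off the front of the list, instead of A's per-element buffer that is appended to and length-checked on every line.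
import Mathlib
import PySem

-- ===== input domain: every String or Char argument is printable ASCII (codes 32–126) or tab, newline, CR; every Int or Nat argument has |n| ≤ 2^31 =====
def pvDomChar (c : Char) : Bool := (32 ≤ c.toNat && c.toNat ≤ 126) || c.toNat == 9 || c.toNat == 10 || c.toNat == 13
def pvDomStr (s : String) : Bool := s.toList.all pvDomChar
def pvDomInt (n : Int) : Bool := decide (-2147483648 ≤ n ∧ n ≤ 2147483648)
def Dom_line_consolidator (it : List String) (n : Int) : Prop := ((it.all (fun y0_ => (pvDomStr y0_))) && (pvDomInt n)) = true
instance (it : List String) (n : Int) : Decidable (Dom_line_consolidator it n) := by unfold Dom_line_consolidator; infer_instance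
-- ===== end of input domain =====

-- B replaces A's growing per-line buffer by one upfront chunk size max(n+1,1) and
-- repeated fixed-size front slices; alternative decomposition, same cost. Both ports
-- realise the generators as the list of all yielded values.

-- ===== PORT A =====
-- buffer loop: append each line, flush when len(lines) > n, final flush if nonempty
def lcGo (n : Int) (lines : List String) : List String → List String
  | [] => if lines = [] then [] else [PySem.Str.join "" lines]
  | line :: rest =>
      let lines' := lines ++ [line]
      if (lines'.length : Int) > n then PySem.Str.join "" lines' :: lcGo n [] rest
      else lcGo n lines' rest

def line_consolidator (it : List String) (n : Int) : List String := lcGo n [] it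

-- ===== PORT B =====
-- while xs: yield ''.join(xs[:step]); xs = xs[step:]   (step ≥ 1 carried as a proof for termination)
def lcAltGo (step : Int) (hstep : 1 ≤ step) (xs : List String) : List String :=
  if xs = [] then []
  else PySem.Str.join "" (PySem.List.slice xs none (some step)) ::
       lcAltGo step hstep (PySem.List.slice xs (some step) none)
termination_by xs.length
decreasing_by
  rename_i hne
  rw [PySem.List.slice_from xs (by omega : (0:Int) ≤ step)]
  have h1 : 1 ≤ step.toNat := by omega
  have : 0 < xs.length := List.length_pos_iff.mpr hne
  simp only [List.length_drop]
  omega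

def line_consolidator_alt (it : List String) (n : Int) : List String :=
  lcAltGo (if 0 ≤ n then n + 1 else 1) (by split <;> omega) it

-- ===== PRECONDITION & SPEC =====
def Spec_line_consolidator (it : List String) (n : Int) (out : List String) : Prop := out = line_consolidator_alt it n
instance (it : List String) (n : Int) (out : List String) : Decidable (Spec_line_consolidator it n out) := by unfold Spec_line_consolidator; infer_instance

-- ===== CLAIM (what is proved, stated in full; the proofs are below) =====
def Claim_equal_line_consolidator : Prop := ∀ (it : List String) (n : Int), Dom_line_consolidator it n → Spec_line_consolidator it n (line_consolidator it n)

-- ===== LEMMAS AND PROOFS =====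

-- A's buffer loop, started with room for k more lines, emits one chunk completing the
-- buffer with the next k lines and restarts empty.
theorem lcGo_flush (n : Int) (step : Int) (hstep : step = if 0 ≤ n then n + 1 else 1) :
    ∀ (xs lines : List String) (k : Nat), 0 < k → (lines.length : Int) + k = step →
      lcGo n lines xs = if xs = [] ∧ lines = [] then []
        else PySem.Str.join "" (lines ++ xs.take k) :: lcGo n [] (xs.drop k) := by
  intro xs
  induction xs with
  | nil =>
      intro lines k hk hlen
      by_cases h : lines = [] <;> simp [lcGo, h]
  | cons y rest ih =>
      intro lines k hk hlen
      rcases k with _ | m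
      · omega
      have hstepn : n < step := by rw [hstep]; split <;> omega
      by_cases hm : m = 0
      · subst hm
        have hcond : ((lines ++ [y]).length : Int) > n := by
          simp only [List.length_append, List.length_cons, List.length_nil]
          push_cast
          omega
        simp only [lcGo, hcond, if_pos]
        simp [List.take, List.drop]
      · have hm1 : 0 < m := Nat.pos_of_ne_zero hm
        have hn0 : 0 ≤ n := by
          by_contra hneg
          rw [if_neg hneg] at hstep
          omega
        have hcond : ¬ ((lines ++ [y]).length : Int) > n := by
          rw [if_pos hn0] at hstep
          have hl : (lines ++ [y]).length = lines.length + 1 := by simp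
          rw [hl]
          push_cast
          omega
        simp only [lcGo, hcond, if_neg, not_false_iff]
        rw [ih (lines ++ [y]) m hm1 (by
          have hl : (lines ++ [y]).length = lines.length + 1 := by simp
          rw [hl]; push_cast; push_cast at hlen; omega)]
        simp [List.take_succ_cons, List.drop_succ_cons]

-- both loops produce the same chunk sequence
theorem lcGo_eq_lcAltGo (n : Int) (step : Int) (hstep : step = if 0 ≤ n then n + 1 else 1)
    (h1 : 1 ≤ step) :
    ∀ (xs : List String), lcGo n [] xs = lcAltGo step h1 xs := by
  intro xs
  rw [lcAltGo.eq_def]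
  by_cases hx : xs = []
  · simp [hx, lcGo]
  · rw [if_neg hx]
    have hk : 0 < step.toNat := by omega
    have hcast : ((([] : List String)).length : Int) + (step.toNat : Nat) = step := by
      simp; omega
    rw [lcGo_flush n step hstep xs [] step.toNat hk hcast]
    rw [if_neg (by simp [hx])]
    rw [PySem.List.slice_to xs (by omega : (0:Int) ≤ step),
        PySem.List.slice_from xs (by omega : (0:Int) ≤ step)]
    simp only [List.nil_append]
    rw [lcGo_eq_lcAltGo n step hstep h1 (xs.drop step.toNat)]
  termination_by xs => xs.length
  decreasing_by
    have : 0 < xs.length := List.length_pos_iff.mpr hx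
    simp only [List.length_drop]
    omega

-- ===== VERDICT (by name: the statement is the Claim_ definition above) =====
theorem line_consolidator_spec : Claim_equal_line_consolidator := by
  intro it n _
  unfold Spec_line_consolidator line_consolidator line_consolidator_alt
  exact lcGo_eq_lcAltGo n _ rfl _ it
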